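-- pv_equiv track=rewrite | github.com/THEman6989/ai-stack | langgraph-app/agent_graph.py | _looks_like_coding_task
-- ===== SOURCE A (Python) =====
-- def _looks_like_coding_task(text: str) -> bool:
--     query = (text or "").lower()
--     triggers = [
--         "code",
--         "repo",
--         "datei",
--         "file",
--         "terminal",
--         "shell",
--         "patch",
--         "implement",
--         "refactor",
--         "docker",
--         "git",
--         "python",
--         "typescript",
--         "javascript",
--         "fastapi",
--         "langgraph",
--         "fix",
--         "bug",
--     ]
--     return any(trigger in query for trigger in triggers)
-- ===== SOURCE B (Python) =====
-- _TRIGGERS = (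
--     "code", "repo", "datei", "file", "terminal", "shell", "patch",
--     "implement", "refactor", "docker", "git", "python", "typescript",
--     "javascript", "fastapi", "langgraph", "fix", "bug",
-- )
--
--
-- def _looks_like_coding_task(text: str) -> bool:
--     query = (text or "").lower()
--     for i in range(len(query)):
--         for t in _TRIGGERS:
--             if query.startswith(t, i):
--                 return True
--     return False
-- ===== Notes on version B (the rewrite author's own statement) =====
-- stated objective: alternative
-- what changed: Replaces 18 independent 'trigger in query' substring scans combined by any() with one left-to-right pass over the text that, at each position, checks whether any trigger starts there (a naive multi-pattern matcher).
import Mathlib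
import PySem

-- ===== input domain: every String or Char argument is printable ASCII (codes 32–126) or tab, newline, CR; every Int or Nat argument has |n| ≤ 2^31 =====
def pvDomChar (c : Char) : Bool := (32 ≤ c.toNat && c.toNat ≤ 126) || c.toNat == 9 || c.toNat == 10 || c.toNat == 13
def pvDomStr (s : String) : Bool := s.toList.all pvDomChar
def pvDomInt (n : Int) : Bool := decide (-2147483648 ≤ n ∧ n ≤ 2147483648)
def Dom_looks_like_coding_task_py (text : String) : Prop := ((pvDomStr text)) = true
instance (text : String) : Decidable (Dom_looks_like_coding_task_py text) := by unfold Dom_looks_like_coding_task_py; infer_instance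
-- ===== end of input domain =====

-- B replaces 18 independent substring scans by one left-to-right pass testing every
-- trigger at each position (alternative decomposition, same asymptotic cost).

def pvTriggers : List String :=
  ["code", "repo", "datei", "file", "terminal", "shell", "patch",
   "implement", "refactor", "docker", "git", "python", "typescript",
   "javascript", "fastapi", "langgraph", "fix", "bug"]

-- ===== PORT A =====
def looks_like_coding_task_py (text : String) : Bool :=
  let query := PySem.Str.lower (if text == "" then "" else text)
  pvTriggers.any (fun trigger => PySem.Str.isIn trigger query)

-- ===== PORT B =====
-- Source B's index loop 'for i in range(len(query))' = structural recursion on the suffixes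
-- of query; 'query.startswith(t, i)' = t.isPrefixOf (the suffix at i); early return = ||.
def pvScanB (ts : List (List Char)) : List Char → Bool
  | [] => false
  | c :: rest => ts.any (fun t => t.isPrefixOf (c :: rest)) || pvScanB ts rest

def looks_like_coding_task_py_alt (text : String) : Bool :=
  let query := PySem.Str.lower (if text == "" then "" else text)
  pvScanB (pvTriggers.map String.toList) query.toList

-- ===== PRECONDITION & SPEC =====
def Spec_looks_like_coding_task_py (text : String) (out : Bool) : Prop := out = looks_like_coding_task_py_alt text
instance (text : String) (out : Bool) : Decidable (Spec_looks_like_coding_task_py text out) := by unfold Spec_looks_like_coding_task_py; infer_instance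

-- ===== CLAIM (what is proved, stated in full; the proofs are below) =====
def Claim_equal_looks_like_coding_task_py : Prop := ∀ (text : String), Dom_looks_like_coding_task_py text → Spec_looks_like_coding_task_py text (looks_like_coding_task_py text)

-- ===== LEMMAS AND PROOFS =====

-- B's scan finds a position where some pattern starts iff some pattern is an infix
-- (patterns must be nonempty, as all triggers are).
lemma pvScanB_iff (ts : List (List Char)) (h : ∀ t ∈ ts, t ≠ []) (q : List Char) :
    pvScanB ts q = true ↔ ∃ t ∈ ts, t <:+: q := by
  induction q with
  | nil =>
    simp only [pvScanB, Bool.false_eq_true, false_iff, not_exists]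
    intro t
    simp only [not_and]
    intro ht hinf
    exact h t ht (List.infix_nil.mp hinf)
  | cons c rest ih =>
    simp only [pvScanB, Bool.or_eq_true, List.any_eq_true, ih]
    constructor
    · rintro (⟨t, ht, hp⟩ | ⟨t, ht, hi⟩)
      · exact ⟨t, ht, List.infix_cons_iff.mpr (Or.inl (List.isPrefixOf_iff_prefix.mp hp))⟩
      · exact ⟨t, ht, List.infix_cons_iff.mpr (Or.inr hi)⟩
    · rintro ⟨t, ht, hi⟩
      rcases List.infix_cons_iff.mp hi with hp | hi'
      · exact Or.inl ⟨t, ht, List.isPrefixOf_iff_prefix.mpr hp⟩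
      · exact Or.inr ⟨t, ht, hi'⟩

lemma pvTriggers_ne_nil : ∀ t ∈ pvTriggers.map String.toList, t ≠ [] := by decide

-- ===== VERDICT (by name: the statement is the Claim_ definition above) =====
theorem looks_like_coding_task_py_spec : Claim_equal_looks_like_coding_task_py := by
  intro text _
  unfold Spec_looks_like_coding_task_py
  simp only [looks_like_coding_task_py, looks_like_coding_task_py_alt]
  rw [Bool.eq_iff_iff]
  simp only [List.any_eq_true, PySem.Str.isIn_iff_infix,
    pvScanB_iff _ pvTriggers_ne_nil, List.mem_map]
  constructor
  · rintro ⟨t, ht, hi⟩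
    exact ⟨t.toList, ⟨t, ht, rfl⟩, hi⟩
  · rintro ⟨l, ⟨t, ht, rfl⟩, hi⟩
    exact ⟨t, ht, hi⟩
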